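-- pv_equiv track=rewrite | github.com/Avi04w/PythonProjects | CCC/CCC2011Senior/AliceThroughTheLookingGlass.py | max_y
-- ===== SOURCE A (Python) =====
-- def max_y(a, b):
--     if a >= 1:
--         p = 5 ** (a - 1)
--         location = b // p
--         if location == 0 or location == 4:
--             return 0
--         elif location == 1 or location == 3:
--             return 1 * p + max_y(a - 1, b % p)
--         elif location == 2:
--             return 2 * p + max_y(a - 1, b % p)
--     return 0
-- ===== SOURCE B (Python) =====
-- def max_y(a, b):
--     if a < 1:
--         return 0
--     # phase 1: peel off base-5 digits of b from the top, keeping the leading run in {1,2,3}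
--     run = []
--     r = b
--     for k in range(a - 1, -1, -1):
--         d, r = divmod(r, 5 ** k)
--         if d not in (1, 2, 3):
--             break
--         run.append(d)
--     # phase 2: sum each run digit's contribution at its position
--     return sum((2 if d == 2 else 1) * 5 ** (a - 1 - i) for i, d in enumerate(run))
-- ===== Notes on version B (the rewrite author's own statement) =====
-- stated objective: alternative
-- what changed: Replaces the single interleaved recursion with two staged passes: first extract the leading run of base-5 digits of b that lie in {1,2,3} via repeated divmod, then sum each run digit's positional contribution.
import Mathlib
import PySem

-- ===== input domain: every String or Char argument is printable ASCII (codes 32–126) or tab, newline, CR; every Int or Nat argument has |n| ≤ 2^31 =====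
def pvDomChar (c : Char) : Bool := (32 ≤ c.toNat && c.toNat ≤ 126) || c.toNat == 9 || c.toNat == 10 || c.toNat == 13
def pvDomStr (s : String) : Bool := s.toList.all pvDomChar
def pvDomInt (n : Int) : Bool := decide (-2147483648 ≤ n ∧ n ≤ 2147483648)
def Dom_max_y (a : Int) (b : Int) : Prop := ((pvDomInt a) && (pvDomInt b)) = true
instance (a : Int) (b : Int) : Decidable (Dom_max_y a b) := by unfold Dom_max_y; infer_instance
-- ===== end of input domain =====

-- B replaces A's interleaved recursion by two staged passes: extract the base-5 digit list first, then scan it (alternative decomposition, same cost).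


-- ===== PORT A =====
def max_y (a : Int) (b : Int) : Int :=
  if _h : a ≥ 1 then
    let p : Int := 5 ^ (a - 1).toNat
    let location := PySem.Int.floordiv b p
    if location = 0 ∨ location = 4 then 0
    else if location = 1 ∨ location = 3 then 1 * p + max_y (a - 1) (PySem.Int.mod b p)
    else if location = 2 then 2 * p + max_y (a - 1) (PySem.Int.mod b p)
    else 0
  else 0
termination_by a.toNat
decreasing_by all_goals omega

-- ===== PORT B =====
-- phase 1 of Source B: the `for k in range(a-1,-1,-1)` divmod loop with its break, as
-- recursion on the number of remaining digit positions, carrying the residue r;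
-- returns the leading run of digits in {1,2,3}
def pvRun : Nat → Int → List Int
  | 0, _ => []
  | Nat.succ k, r =>
      let d := PySem.Int.floordiv r (5 ^ k)
      if d = 1 ∨ d = 2 ∨ d = 3 then d :: pvRun k (PySem.Int.mod r (5 ^ k)) else []

-- phase 2 of Source B: the `sum(... for i, d in enumerate(run))`, as recursion on the
-- run list; k is the exponent a-1-i, counted down
def pvSum : List Int → Nat → Int
  | [], _ => 0
  | d :: ds, k => (if d = 2 then (2 : Int) else 1) * 5 ^ k + pvSum ds (k - 1)

def max_y_alt (a : Int) (b : Int) : Int :=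
  if a < 1 then 0
  else pvSum (pvRun a.toNat b) (a.toNat - 1)

-- ===== PRECONDITION & SPEC =====
def Spec_max_y (a : Int) (b : Int) (out : Int) : Prop := out = max_y_alt a b
instance (a : Int) (b : Int) (out : Int) : Decidable (Spec_max_y a b out) := by unfold Spec_max_y; infer_instance

-- ===== CLAIM (what is proved, stated in full; the proofs are below) =====
def Claim_equal_max_y : Prop := ∀ (a : Int) (b : Int), Dom_max_y a b → Spec_max_y a b (max_y a b)

-- ===== LEMMAS AND PROOFS =====
theorem max_y_eq_sum (n : Nat) : ∀ (a b : Int), a.toNat ≤ n →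
    max_y a b = pvSum (pvRun a.toNat b) (a.toNat - 1) := by
  induction n with
  | zero =>
    intro a b hn
    have ha : ¬ a ≥ 1 := by omega
    have h0 : a.toNat = 0 := by omega
    rw [max_y]
    simp [ha, h0, pvRun, pvSum]
  | succ n ih =>
    intro a b hn
    by_cases ha : a ≥ 1
    · have hk : a.toNat = (a - 1).toNat + 1 := by omega
      rw [max_y]
      simp only [ha, dif_pos]
      set k := (a - 1).toNat with hkdef
      rw [hk, pvRun]
      simp only [Nat.add_sub_cancel]
      set p : Int := 5 ^ k with hp
      set l := PySem.Int.floordiv b p with hl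
      have hIH : max_y (a - 1) (PySem.Int.mod b p)
          = pvSum (pvRun k (PySem.Int.mod b p)) (k - 1) :=
        ih _ _ (by omega)
      by_cases h04 : l = 0 ∨ l = 4
      · have h123 : ¬ (l = 1 ∨ l = 2 ∨ l = 3) := by rcases h04 with h | h <;> omega
        simp [h04, h123, pvSum]
      · by_cases h13 : l = 1 ∨ l = 3
        · have h123 : l = 1 ∨ l = 2 ∨ l = 3 := by rcases h13 with h | h <;> omega
          have h2 : l ≠ 2 := by rcases h13 with h | h <;> omega
          rw [if_neg h04, if_pos h13, if_pos h123, pvSum, if_neg h2, hIH]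
        · by_cases h2 : l = 2
          · have h123 : l = 1 ∨ l = 2 ∨ l = 3 := by omega
            rw [if_neg h04, if_neg h13, if_pos h2, if_pos h123, pvSum, if_pos h2, hIH]
          · have h123 : ¬ (l = 1 ∨ l = 2 ∨ l = 3) := by
              rintro (h | h | h)
              · exact h13 (Or.inl h)
              · exact h2 h
              · exact h13 (Or.inr h)
            rw [if_neg h04, if_neg h13, if_neg h2, if_neg h123, pvSum]
    · have h0 : a.toNat = 0 := by omega
      rw [max_y]
      simp [ha, h0, pvRun, pvSum]

-- ===== VERDICT (by name: the statement is the Claim_ definition above) =====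
theorem max_y_spec : Claim_equal_max_y := by
  intro a b _
  unfold Spec_max_y max_y_alt
  by_cases ha : a < 1
  · have h0 : a.toNat = 0 := by omega
    have : ¬ a ≥ 1 := by omega
    rw [if_pos ha, max_y]
    simp [this]
  · rw [if_neg ha, max_y_eq_sum a.toNat a b (le_refl _)]
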